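-- pv_equiv track=rewrite | github.com/wan-catherine/Leetcode | problems/N914_X_Of_A_Kind_In_A_Deck_Of_Cards.py | hasGroupsSizeX_slow
-- ===== SOURCE A (Python) =====
-- from collections import defaultdict
--
-- def hasGroupsSizeX_slow(deck):
--     """
--     :type deck: List[int]
--     :rtype: bool
--     """
--     if not deck:
--         return False
--
--     deck_len = len(deck)
--     if deck_len < 2:
--         return False
--
--     dict = defaultdict(int)
--     for i in deck:
--         dict[i] += 1
--     min_num = min(dict.values())
--
--     x = 2
--     while x <= min_num:
--         flag = True
--         for key in dict:
--             if dict[key] % x: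
--                 flag = False
--                 break
--         if flag:
--             return flag
--         x += 1
--     return False
-- ===== SOURCE B (Python) =====
-- def hasGroupsSizeX_slow(deck):
--     """
--     :type deck: List[int]
--     :rtype: bool
--     """
--     if not deck:
--         return False
--     if len(deck) < 2:
--         return False
--
--     counts = {}
--     for c in deck:
--         counts[c] = counts.get(c, 0) + 1
--
--     g = 0
--     for v in counts.values():
--         # Euclidean gcd of the accumulator with this count
--         while v:
--             g, v = v, g % v
--     return g >= 2
-- ===== Notes on version B (the rewrite author's own statement) =====
-- stated objective: alternative
-- what changed: Instead of trial-testing every candidate divisor x from 2 up to the minimum count against all counts, B folds a single Euclidean gcd accumulator over the count values once and returns gcd >= 2.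
import Mathlib
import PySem

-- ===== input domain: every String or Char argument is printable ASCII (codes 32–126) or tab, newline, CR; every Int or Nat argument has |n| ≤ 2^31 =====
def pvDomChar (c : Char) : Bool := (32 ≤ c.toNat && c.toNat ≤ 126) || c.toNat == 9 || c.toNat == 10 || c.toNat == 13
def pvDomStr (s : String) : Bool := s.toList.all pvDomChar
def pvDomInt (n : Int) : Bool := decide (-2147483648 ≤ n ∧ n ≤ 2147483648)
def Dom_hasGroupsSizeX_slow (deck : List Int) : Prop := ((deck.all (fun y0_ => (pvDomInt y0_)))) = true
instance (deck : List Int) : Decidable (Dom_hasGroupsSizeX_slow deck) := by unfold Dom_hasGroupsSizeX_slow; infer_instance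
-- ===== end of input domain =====

-- B replaces A's trial division of every candidate x in [2, min count] against all counts
-- by a single Euclidean-gcd fold over the count values (alternative decomposition).

-- ===== PORT A =====
-- A's while loop: x runs upward while x <= min_num; returns True as soon as every
-- count is divisible by x ('flag' = the inner for-with-break), else False after the loop.
def pvAloop (d : PySem.Dict Int Int) (min_num x : Int) : Bool :=
  if _h : x ≤ min_num then
    let flag := d.keys.all (fun key => PySem.Int.mod (d.getD key 0) x == 0)
    if flag then true else pvAloop d min_num (x + 1)
  else false
termination_by (min_num + 1 - x).toNat
decreasing_by omega

-- ===== PORT A (entry point) =====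
def hasGroupsSizeX_slow (deck : List Int) : Bool :=
  if deck = [] then false
  else if deck.length < 2 then false
  else
    let d := deck.foldl (fun d i => d.modify i 0 (· + 1)) PySem.Dict.empty
    match PySem.List.min? d.values (fun v => v) with
    | none => false          -- unreachable: deck ≠ [] so the dict has values
    | some min_num => pvAloop d min_num 2

-- ===== PORT B =====
-- inner 'while v: g, v = v, g % v'
def pvEuclid (g v : Int) : Int :=
  if _h : v = 0 then g else pvEuclid v (PySem.Int.mod g v)
termination_by v.natAbs
decreasing_by
  rcases lt_trichotomy v 0 with hv | hv | hv
  · have h1 := (PySem.Int.mod_neg_bounds g hv).1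
    have h2 := (PySem.Int.mod_neg_bounds g hv).2
    omega
  · omega
  · have h1 := PySem.Int.mod_nonneg g hv
    have h2 := PySem.Int.mod_lt g hv
    omega

def hasGroupsSizeX_slow_alt (deck : List Int) : Bool :=
  if deck = [] then false
  else if deck.length < 2 then false
  else
    let counts := deck.foldl (fun d c => d.insert c (d.getD c 0 + 1)) PySem.Dict.empty
    let g := counts.values.foldl (fun g v => pvEuclid g v) 0
    decide (2 ≤ g)


-- ===== PRECONDITION & SPEC =====
def Spec_hasGroupsSizeX_slow (deck : List Int) (out : Bool) : Prop := out = hasGroupsSizeX_slow_alt deck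
instance (deck : List Int) (out : Bool) : Decidable (Spec_hasGroupsSizeX_slow deck out) := by unfold Spec_hasGroupsSizeX_slow; infer_instance

-- ===== CLAIM (what is proved, stated in full; the proofs are below) =====
def Claim_equal_hasGroupsSizeX_slow : Prop := ∀ (deck : List Int), Dom_hasGroupsSizeX_slow deck → Spec_hasGroupsSizeX_slow deck (hasGroupsSizeX_slow deck)

-- ===== LEMMAS AND PROOFS =====

theorem pvEuclid_eq_gcd (g v : Int) : 0 ≤ g → 0 ≤ v → pvEuclid g v = (Int.gcd g v : Int) := by
  fun_induction pvEuclid g v with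
  | case1 g =>
    intro hg hv
    simp [Int.gcd, Int.natAbs_of_nonneg hg]
  | case2 g v hne ih =>
    intro hg hv
    have hpos : 0 < v := lt_of_le_of_ne hv (Ne.symm hne)
    have hm : PySem.Int.mod g v = g % v := PySem.Int.mod_eq_emod_of_pos hpos
    have hmn : 0 ≤ g % v := Int.emod_nonneg g (by omega)
    rw [hm] at ih ⊢
    rw [ih hv hmn]
    congr 1
    have h1 : (g % v).natAbs = g.natAbs % v.natAbs := Int.natAbs_emod_of_nonneg hg v
    rw [Int.gcd, Int.gcd, h1, Nat.gcd_comm, ← Nat.gcd_rec, Nat.gcd_comm]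

theorem pvAloop_true_iff (d : PySem.Dict Int Int) (m x : Int) :
    pvAloop d m x = true ↔
      ∃ i : Int, x ≤ i ∧ i ≤ m ∧ ∀ k ∈ d.keys, PySem.Int.mod (d.getD k 0) i = 0 := by
  fun_induction pvAloop d m x with
  | case1 x hle flag hf =>
    simp only [flag, List.all_eq_true, beq_iff_eq] at hf
    simp only [true_iff]
    exact ⟨x, le_refl x, hle, hf⟩
  | case2 x hle flag hf ih =>
    simp only [flag, List.all_eq_true, beq_iff_eq, not_forall] at hf
    rw [ih]
    constructor
    · rintro ⟨i, h1, h2, h3⟩; exact ⟨i, by omega, h2, h3⟩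
    · rintro ⟨i, h1, h2, h3⟩
      refine ⟨i, ?_, h2, h3⟩
      rcases eq_or_lt_of_le h1 with rfl | hlt
      · exact absurd h3 (by simpa using hf)
      · omega
  | case3 x hle =>
    refine ⟨fun h => absurd h (by simp), ?_⟩
    rintro ⟨i, h1, h2, _⟩; omega

theorem dvd_foldl_gcd_iff (l : List Nat) (g x : Nat) :
    x ∣ l.foldl Nat.gcd g ↔ x ∣ g ∧ ∀ v ∈ l, x ∣ v := by
  induction l generalizing g with
  | nil => simp
  | cons v t ih => simp [List.foldl_cons, ih, Nat.dvd_gcd_iff, and_assoc]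

theorem foldl_euclid_eq (l : List Int) (g : Int) (hg : 0 ≤ g) (hl : ∀ v ∈ l, 0 ≤ v) :
    l.foldl (fun g v => pvEuclid g v) g
      = ((l.foldl (fun a v => Nat.gcd a v.natAbs) g.natAbs : Nat) : Int) := by
  induction l generalizing g with
  | nil => simp [Int.natAbs_of_nonneg hg]
  | cons v t ih =>
    simp only [List.foldl_cons]
    rw [pvEuclid_eq_gcd g v hg (hl v (by simp))]
    rw [ih _ (by positivity) (fun w hw => hl w (by simp [hw]))]
    simp [Int.gcd]

theorem pv_main_eq (deck : List Int) : hasGroupsSizeX_slow deck = hasGroupsSizeX_slow_alt deck := by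
  unfold hasGroupsSizeX_slow hasGroupsSizeX_slow_alt
  by_cases h0 : deck = []
  · simp [h0]
  by_cases h1 : deck.length < 2
  · simp [h0, h1]
  simp only [if_neg h0, if_neg h1]
  rw [PySem.Dict.foldl_insert_getD_add_one_eq_counter, ← PySem.Dict.counter_eq_foldl]
  set d := PySem.Dict.counter deck with hd
  -- values of the counter
  have hvals : d.values = (PySem.Set.ofList deck).map (fun k => ((deck.count k : Nat) : Int)) := by
    show d.items.map Prod.snd = _
    rw [hd, PySem.Dict.items_counter, List.map_map]
    rfl
  have hpos : ∀ v ∈ d.values, 1 ≤ v := by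
    intro v hv
    rw [hvals] at hv
    obtain ⟨k, hk, rfl⟩ := List.mem_map.mp hv
    have : k ∈ deck := (PySem.Set.mem_ofList deck k).mp hk
    have := List.count_pos_iff.mpr this
    omega
  have hvne : d.values ≠ [] := by
    intro hcon
    obtain ⟨a, ha⟩ := List.exists_mem_of_ne_nil deck h0
    have ha' : a ∈ PySem.Set.ofList deck := (PySem.Set.mem_ofList deck a).mpr ha
    rw [hvals, List.map_eq_nil_iff] at hcon
    rw [hcon] at ha'
    simp at ha'
  -- the min exists
  cases hmin : PySem.List.min? d.values (fun v => v) with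
  | none => exact absurd ((PySem.List.min?_eq_none_iff _ _).mp hmin) hvne
  | some m =>
    have hmmem : m ∈ d.values := PySem.List.min?_mem hmin
    have hmle : ∀ v ∈ d.values, m ≤ v := PySem.List.min?_isMin hmin
    have hm1 : 1 ≤ m := hpos m hmmem
    -- the gcd fold
    set N : Nat := d.values.foldl (fun a v => Nat.gcd a v.natAbs) 0 with hN
    have hfold : d.values.foldl (fun g v => pvEuclid g v) 0 = (N : Int) := by
      rw [foldl_euclid_eq _ 0 le_rfl (fun v hv => le_trans (by omega) (hpos v hv))]
      rfl
    rw [hfold]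
    have hNdvd : ∀ x : Nat, x ∣ N ↔ ∀ v ∈ d.values, x ∣ v.natAbs := by
      intro x
      have hN2 : N = List.foldl Nat.gcd 0 (d.values.map Int.natAbs) := by
        rw [List.foldl_map]
      rw [hN2, dvd_foldl_gcd_iff]
      simp
    have hNpos : 0 < N := by
      rcases Nat.eq_zero_or_pos N with h | h
      · exfalso
        have := (hNdvd N).mp dvd_rfl m hmmem
        rw [h] at this
        have := Nat.eq_zero_of_zero_dvd this
        omega
      · exact h
    -- key equivalence
    rw [Bool.eq_iff_iff, pvAloop_true_iff, decide_eq_true_iff]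
    constructor
    · rintro ⟨i, h2i, him, hdiv⟩
      have hidvd : ∀ v ∈ d.values, i.natAbs ∣ v.natAbs := by
        intro v hv
        rw [hvals] at hv
        obtain ⟨k, hk, rfl⟩ := List.mem_map.mp hv
        have hk' := hdiv k (by rw [hd, PySem.Dict.keys_counter]; exact hk)
        rw [hd, PySem.Dict.getD_counter, PySem.Int.mod_eq_zero_iff_dvd] at hk'
        have : i ∣ ((deck.count k : Nat) : Int) := hk'
        rw [Int.natAbs_natCast]
        have := Int.natAbs_dvd_natAbs.mpr this
        simpa using this
      have hdN : i.natAbs ∣ N := (hNdvd i.natAbs).mpr hidvd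
      have := Nat.le_of_dvd hNpos hdN
      omega
    · intro h2N
      refine ⟨(N : Int), by omega, ?_, ?_⟩
      · have := (hNdvd N).mp dvd_rfl m hmmem
        have hle := Nat.le_of_dvd (by omega) this
        omega
      · intro k hk
        rw [hd, PySem.Dict.keys_counter] at hk
        rw [hd, PySem.Dict.getD_counter, PySem.Int.mod_eq_zero_iff_dvd]
        have hv : ((deck.count k : Nat) : Int) ∈ d.values := by
          rw [hvals]; exact List.mem_map.mpr ⟨k, hk, rfl⟩
        have := (hNdvd N).mp dvd_rfl _ hv
        rw [Int.natAbs_natCast] at this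
        exact Int.natCast_dvd_natCast.mpr this

-- ===== VERDICT (by name: the statement is the Claim_ definition above) =====
theorem hasGroupsSizeX_slow_spec : Claim_equal_hasGroupsSizeX_slow := by
  intro deck _
  unfold Spec_hasGroupsSizeX_slow
  exact pv_main_eq deck
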